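-- pv_equiv track=rewrite | github.com/jzahorec/programovani | vlastni/dota_2.py | tell_rank
-- ===== SOURCE A (Python) =====
-- def tell_rank(stars):
--     ranks_named = ["Herald", "Guardian", "Crusader", "Archon", "Legend", "Ancient", "Divine", "Immortal"]
--     i = 1
--     for rank in ranks_named:
--         for star in range(1, 6):
--             if i >= stars:
--                 return rank, star
--             i += 1
-- ===== SOURCE B (Python) =====
-- def tell_rank(stars):
--     ranks_named = ["Herald", "Guardian", "Crusader", "Archon", "Legend", "Ancient", "Divine", "Immortal"]
--     pos = stars if stars > 1 else 1
--     if pos > 40: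
--         return None
--     rank_idx, star_minus = divmod(pos - 1, 5)
--     return ranks_named[rank_idx], star_minus + 1
-- ===== Notes on version B (the rewrite author's own statement) =====
-- stated objective: simpler
-- what changed: Replaces the nested scan over ranks and stars with a single closed-form divmod computation on the clamped star count.
import Mathlib
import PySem

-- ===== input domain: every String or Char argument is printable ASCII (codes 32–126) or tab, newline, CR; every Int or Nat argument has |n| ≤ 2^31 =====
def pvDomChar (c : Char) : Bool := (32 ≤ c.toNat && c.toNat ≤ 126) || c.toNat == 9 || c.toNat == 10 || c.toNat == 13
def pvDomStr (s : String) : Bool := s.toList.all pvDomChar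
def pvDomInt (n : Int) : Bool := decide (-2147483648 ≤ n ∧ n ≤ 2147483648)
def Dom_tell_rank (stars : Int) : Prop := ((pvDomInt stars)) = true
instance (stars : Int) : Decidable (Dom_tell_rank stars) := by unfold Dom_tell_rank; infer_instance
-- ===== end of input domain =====

-- B replaces A's nested 8x5 scan with a closed-form divmod computation (simpler, same results).


-- ===== PORT A =====
def pvRanksNamed : List String :=
  ["Herald", "Guardian", "Crusader", "Archon", "Legend", "Ancient", "Divine", "Immortal"]

-- inner 'for star in range(1, 6)' loop: returns (early-return value, updated i)
def tellInner (rank : String) (stars : Int) : Int → List Int → Option (String × Int) × Int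
  | i, [] => (none, i)
  | i, star :: rest =>
      if i ≥ stars then (some (rank, star), i)
      else tellInner rank stars (i + 1) rest

-- outer 'for rank in ranks_named' loop threading i
def tellOuter (stars : Int) : Int → List String → Option (String × Int)
  | _, [] => none
  | i, rank :: rest =>
      match tellInner rank stars i (PySem.List.pyRange 1 6 1) with
      | (some r, _) => some r
      | (none, i') => tellOuter stars i' rest

def tell_rank (stars : Int) : Option (String × Int) :=
  tellOuter stars 1 pvRanksNamed

-- ===== PORT B =====
def tell_rank_alt (stars : Int) : Option (String × Int) :=
  let pos := if stars > 1 then stars else 1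
  if pos > 40 then none
  else
    let rankIdx := PySem.Int.floordiv (pos - 1) 5
    let starMinus := PySem.Int.mod (pos - 1) 5
    (PySem.List.pyGet? pvRanksNamed rankIdx).map (fun rank => (rank, starMinus + 1))

-- ===== PRECONDITION & SPEC =====
def Spec_tell_rank (stars : Int) (out : Option (String × Int)) : Prop := out = tell_rank_alt stars
instance (stars : Int) (out : Option (String × Int)) : Decidable (Spec_tell_rank stars out) := by unfold Spec_tell_rank; infer_instance

-- ===== CLAIM (what is proved, stated in full; the proofs are below) =====
def Claim_equal_tell_rank : Prop := ∀ (stars : Int), Dom_tell_rank stars → Spec_tell_rank stars (tell_rank stars)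

-- ===== LEMMAS AND PROOFS =====
theorem pyRange_1_6 : PySem.List.pyRange 1 6 1 = [1, 2, 3, 4, 5] := by decide

theorem tell_rank_low (stars : Int) (h : stars ≤ 1) :
    tell_rank stars = some ("Herald", 1) := by
  simp only [tell_rank, pvRanksNamed, tellOuter, pyRange_1_6, tellInner]
  simp [h]

theorem tell_rank_alt_low (stars : Int) (h : stars ≤ 1) :
    tell_rank_alt stars = some ("Herald", 1) := by
  have h' : ¬ stars > 1 := by omega
  simp [tell_rank_alt, h']
  decide

theorem tellInner_none (rank : String) (stars : Int) :
    ∀ (l : List Int) (i : Int), i + l.length ≤ stars →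
      tellInner rank stars i l = (none, i + l.length) := by
  intro l
  induction l with
  | nil => intro i h; simp [tellInner]
  | cons a rest ih =>
      intro i h
      simp only [List.length_cons] at h ⊢
      rw [tellInner, if_neg (by push_cast at h ⊢; omega)]
      rw [ih (i + 1) (by push_cast at h ⊢; omega)]
      congr 1
      push_cast
      ring

theorem tell_rank_high (stars : Int) (h : 41 ≤ stars) :
    tell_rank stars = none := by
  have e1 : tellInner "Herald" stars 1 [1, 2, 3, 4, 5] = (none, 6) := by
    rw [tellInner_none _ _ _ _ (by simp; omega)]; norm_num
  have e2 : tellInner "Guardian" stars 6 [1, 2, 3, 4, 5] = (none, 11) := by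
    rw [tellInner_none _ _ _ _ (by simp; omega)]; norm_num
  have e3 : tellInner "Crusader" stars 11 [1, 2, 3, 4, 5] = (none, 16) := by
    rw [tellInner_none _ _ _ _ (by simp; omega)]; norm_num
  have e4 : tellInner "Archon" stars 16 [1, 2, 3, 4, 5] = (none, 21) := by
    rw [tellInner_none _ _ _ _ (by simp; omega)]; norm_num
  have e5 : tellInner "Legend" stars 21 [1, 2, 3, 4, 5] = (none, 26) := by
    rw [tellInner_none _ _ _ _ (by simp; omega)]; norm_num
  have e6 : tellInner "Ancient" stars 26 [1, 2, 3, 4, 5] = (none, 31) := by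
    rw [tellInner_none _ _ _ _ (by simp; omega)]; norm_num
  have e7 : tellInner "Divine" stars 31 [1, 2, 3, 4, 5] = (none, 36) := by
    rw [tellInner_none _ _ _ _ (by simp; omega)]; norm_num
  have e8 : tellInner "Immortal" stars 36 [1, 2, 3, 4, 5] = (none, 41) := by
    rw [tellInner_none _ _ _ _ (by simp; omega)]; norm_num
  simp only [tell_rank, pvRanksNamed, tellOuter, pyRange_1_6, e1, e2, e3, e4, e5, e6, e7, e8]

theorem tell_rank_alt_high (stars : Int) (h : 41 ≤ stars) :
    tell_rank_alt stars = none := by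
  have h1 : stars > 1 := by omega
  have h2 : stars > 40 := by omega
  simp [tell_rank_alt, h1, h2]

-- ===== VERDICT (by name: the statement is the Claim_ definition above) =====
theorem tell_rank_spec : Claim_equal_tell_rank := by
  intro stars _
  unfold Spec_tell_rank
  by_cases h : stars ≤ 1
  · rw [tell_rank_low stars h, tell_rank_alt_low stars h]
  · by_cases h' : stars ≤ 40
    · interval_cases stars <;> decide
    · rw [tell_rank_high stars (by omega), tell_rank_alt_high stars (by omega)]
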